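-- pv_equiv track=rewrite | github.com/jackyzha0/dailycodingproblem | days21_30/day22.py | d22
-- ===== SOURCE A (Python) =====
-- def d22(dictionary, string):
--     res = []
--
--     p0 = 0
--     p1 = 1
--
--     while p1 < len(string) + 1:
--         if string[p0:p1] in dictionary:
--             res.append(string[p0:p1])
--             p0 = p1
--         p1 += 1
--
--     return res
-- ===== SOURCE B (Python) =====
-- def d22(dictionary, string):
--     words = set(w for w in dictionary if w)
--     lengths = sorted(set(len(w) for w in words))
--     n = len(string)
--     res = []
--     pos = 0
--     while pos < n:
--         match = None
--         for L in lengths: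
--             if pos + L <= n and string[pos:pos + L] in words:
--                 match = L
--                 break
--         if match is None:
--             break
--         res.append(string[pos:pos + match])
--         pos += match
--     return res
-- ===== Notes on version B (the rewrite author's own statement) =====
-- stated objective: alternative
-- what changed: Instead of sliding an end pointer over every position and testing each growing prefix against the dictionary list, B hashes the dictionary into a set once, collects the sorted distinct word lengths, and at each output position probes only those candidate lengths (shortest first), jumping past each match and stopping at the first stuck position instead of scanning to the end.
import Mathlib
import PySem

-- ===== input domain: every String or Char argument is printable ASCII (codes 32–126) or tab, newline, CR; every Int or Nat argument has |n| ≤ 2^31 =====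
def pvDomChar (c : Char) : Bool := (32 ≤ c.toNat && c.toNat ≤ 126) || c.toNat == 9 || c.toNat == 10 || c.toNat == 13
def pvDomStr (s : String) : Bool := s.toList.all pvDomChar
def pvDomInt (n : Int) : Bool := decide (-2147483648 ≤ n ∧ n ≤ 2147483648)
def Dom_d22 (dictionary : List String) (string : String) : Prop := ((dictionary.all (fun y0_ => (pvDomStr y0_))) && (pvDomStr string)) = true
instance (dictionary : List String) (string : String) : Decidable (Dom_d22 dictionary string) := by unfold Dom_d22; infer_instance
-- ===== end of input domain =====

-- B replaces A's end-pointer scan over every prefix with a word set built once and a probe over the sorted distinct word lengths at each output position (alternative algorithm; same return value).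


-- ===== PORT A =====
-- while p1 < len(string) + 1: if string[p0:p1] in dictionary: res.append(...); p0 = p1; p1 += 1
def d22Loop (dictionary : List String) (string : String) (res : List String) (p0 p1 : Nat) : List String :=
  if p1 < string.length + 1 then
    let sub := PySem.Str.slice string (some (p0 : Int)) (some (p1 : Int))
    if dictionary.contains sub then
      d22Loop dictionary string (res ++ [sub]) p1 (p1 + 1)
    else
      d22Loop dictionary string res p0 (p1 + 1)
  else res
termination_by string.length + 1 - p1

def d22 (dictionary : List String) (string : String) : List String :=
  d22Loop dictionary string [] 0 1

-- ===== PORT B =====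
-- words = set(w for w in dictionary if w)
def d22Words (dictionary : List String) : PySem.Set String :=
  PySem.Set.ofList (dictionary.filter (fun w => w ≠ ""))

-- lengths = sorted(set(len(w) for w in words))
def d22Lengths (dictionary : List String) : List Nat :=
  PySem.List.sorted (PySem.Set.ofList ((d22Words dictionary).map String.length)) (fun x => x)

-- the inner 'for L in lengths: ... break / else None'
def d22FindLen (string : String) (n : Nat) (words : PySem.Set String) (pos : Nat) :
    List Nat → Option Nat
  | [] => none
  | L :: rest =>
    if pos + L ≤ n ∧ PySem.Set.contains words (PySem.Str.slice string (some (pos : Int)) (some ((pos + L : Nat) : Int))) then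
      some L
    else d22FindLen string n words pos rest

-- the outer 'while pos < n' loop; fuel = n bounds the iterations (every matched length is ≥ 1)
def d22AltLoop (string : String) (n : Nat) (words : PySem.Set String) (lengths : List Nat) :
    Nat → Nat → List String
  | 0, _ => []
  | fuel + 1, pos =>
    if pos < n then
      match d22FindLen string n words pos lengths with
      | some L =>
          PySem.Str.slice string (some (pos : Int)) (some ((pos + L : Nat) : Int)) ::
            d22AltLoop string n words lengths fuel (pos + L)
      | none => []
    else []

def d22_alt (dictionary : List String) (string : String) : List String :=
  d22AltLoop string string.length (d22Words dictionary) (d22Lengths dictionary) string.length 0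

-- ===== PRECONDITION & SPEC =====
def Spec_d22 (dictionary : List String) (string : String) (out : List String) : Prop := out = d22_alt dictionary string
instance (dictionary : List String) (string : String) (out : List String) : Decidable (Spec_d22 dictionary string out) := by unfold Spec_d22; infer_instance

-- ===== CLAIM (what is proved, stated in full; the proofs are below) =====
def Claim_equal_d22 : Prop := ∀ (dictionary : List String) (string : String), Dom_d22 dictionary string → Spec_d22 dictionary string (d22 dictionary string)

-- ===== LEMMAS AND PROOFS =====

-- the slice string[pos:pos+L] as a String
def pvSub (string : String) (pos L : Nat) : String :=
  PySem.Str.slice string (some (pos : Int)) (some ((pos + L : Nat) : Int))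

theorem pvSub_toList (string : String) (pos L : Nat) :
    (pvSub string pos L).toList = (string.toList.drop pos).take L := by
  simp [pvSub, PySem.Str.toList_slice, PySem.Chars.slice_eq_listSlice,
    PySem.List.slice_natCast_add]

theorem pvSub_length (string : String) (pos L : Nat) (h : pos + L ≤ string.length) :
    (pvSub string pos L).length = L := by
  have : (pvSub string pos L).length = (pvSub string pos L).toList.length := rfl
  rw [this, pvSub_toList]
  have hs : string.length = string.toList.length := rfl
  simp [List.length_take, List.length_drop]
  omega

-- "a match of length L starting at pos exists in A's terms"
def pvP (dictionary : List String) (string : String) (pos L : Nat) : Prop :=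
  1 ≤ L ∧ pos + L ≤ string.length ∧ pvSub string pos L ∈ dictionary

theorem pvMem_words (dictionary : List String) (w : String) :
    w ∈ d22Words dictionary ↔ w ∈ dictionary ∧ w ≠ "" := by
  simp [d22Words, PySem.Set.mem_ofList]

theorem pvMem_lengths (dictionary : List String) (L : Nat) :
    L ∈ d22Lengths dictionary ↔ ∃ w ∈ d22Words dictionary, w.length = L := by
  simp [d22Lengths, PySem.List.mem_sorted, PySem.Set.mem_ofList]

theorem pvLengths_pos (dictionary : List String) (L : Nat) (h : L ∈ d22Lengths dictionary) :
    1 ≤ L := by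
  rw [pvMem_lengths] at h
  obtain ⟨w, hw, hl⟩ := h
  rw [pvMem_words] at hw
  have : w.toList ≠ [] := by
    intro hn; exact hw.2 (String.toList_injective (by simp [hn]))
  have : w.length = w.toList.length := rfl
  cases hwl : w.toList with
  | nil => exact absurd hwl ‹w.toList ≠ []›
  | cons a t => simp [← hl, this, hwl]

-- Set.contains agrees with membership (String has LawfulBEq)
theorem pvContains_iff (s : PySem.Set String) (x : String) :
    PySem.Set.contains s x = true ↔ x ∈ s := by
  simp [PySem.Set.contains]

-- the inner-loop condition coincides with pvP
theorem pvCond_iff (dictionary : List String) (string : String) (pos L : Nat) :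
    (pos + L ≤ string.length ∧
        PySem.Set.contains (d22Words dictionary) (pvSub string pos L) = true) ↔
      pvP dictionary string pos L := by
  constructor
  · rintro ⟨hle, hc⟩
    rw [pvContains_iff, pvMem_words] at hc
    refine ⟨?_, hle, hc.1⟩
    by_contra h
    have hL0 : L = 0 := by omega
    subst hL0
    exact hc.2 (String.toList_injective (by simp [pvSub_toList]))
  · rintro ⟨h1, hle, hmem⟩
    refine ⟨hle, ?_⟩
    rw [pvContains_iff, pvMem_words]
    refine ⟨hmem, ?_⟩
    intro hempty
    have h := pvSub_length string pos L hle
    rw [hempty] at h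
    simp at h
    omega

theorem pvFindLen_none (dictionary : List String) (string : String) (pos : Nat)
    (ls : List Nat) (h : ∀ L ∈ ls, ¬ pvP dictionary string pos L) :
    d22FindLen string string.length (d22Words dictionary) pos ls = none := by
  induction ls with
  | nil => rfl
  | cons a t ih =>
    rw [d22FindLen]
    rw [if_neg]
    · exact ih (fun L hL => h L (List.mem_cons_of_mem a hL))
    · intro hc
      exact h a List.mem_cons_self ((pvCond_iff dictionary string pos a).1
        ⟨hc.1, by simpa [pvSub] using hc.2⟩)

theorem pvFindLen_some (dictionary : List String) (string : String) (pos L0 : Nat)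
    (ls : List Nat) (hsort : ls.Pairwise (· < ·)) (hmem : L0 ∈ ls)
    (hP : pvP dictionary string pos L0)
    (hmin : ∀ L' < L0, ¬ pvP dictionary string pos L') :
    d22FindLen string string.length (d22Words dictionary) pos ls = some L0 := by
  induction ls with
  | nil => cases hmem
  | cons a t ih =>
    rw [d22FindLen]
    rcases List.mem_cons.1 hmem with rfl | hmt
    · rw [if_pos]
      have := (pvCond_iff dictionary string pos L0).2 hP
      exact ⟨this.1, by simpa [pvSub] using this.2⟩
    · have hat := (List.pairwise_cons.1 hsort).1 L0 hmt
      rw [if_neg]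
      · exact ih (List.pairwise_cons.1 hsort).2 hmt
      · intro hc
        exact hmin a hat ((pvCond_iff dictionary string pos a).1
          ⟨hc.1, by simpa [pvSub] using hc.2⟩)

theorem pvLengths_sorted (dictionary : List String) :
    (d22Lengths dictionary).Pairwise (· < ·) := by
  exact PySem.List.sorted_ofList_pairwise_lt _

-- a match in A's terms has its length in d22Lengths
theorem pvP_mem_lengths (dictionary : List String) (string : String) (pos L : Nat)
    (hP : pvP dictionary string pos L) : L ∈ d22Lengths dictionary := by
  obtain ⟨h1, hle, hmem⟩ := hP
  rw [pvMem_lengths]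
  refine ⟨pvSub string pos L, ?_, pvSub_length string pos L hle⟩
  rw [pvMem_words]
  refine ⟨hmem, ?_⟩
  intro hempty
  have := pvSub_length string pos L hle
  rw [hempty] at this
  simp at this
  omega

-- found length lies in the searched list
theorem pvFindLen_mem (string : String) (n : Nat) (words : PySem.Set String) (pos : Nat)
    (ls : List Nat) (L : Nat) (h : d22FindLen string n words pos ls = some L) : L ∈ ls := by
  induction ls with
  | nil => cases h
  | cons a t ih =>
    rw [d22FindLen] at h
    split at h
    · cases h; exact List.mem_cons_self
    · exact List.mem_cons_of_mem a (ih h)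

-- fuel irrelevance of the B loop above n - pos
theorem pvAltLoop_fuel (dictionary : List String) (string : String) :
    ∀ (fuel fuel' pos : Nat), string.length - pos ≤ fuel → string.length - pos ≤ fuel' →
      d22AltLoop string string.length (d22Words dictionary) (d22Lengths dictionary) fuel pos =
      d22AltLoop string string.length (d22Words dictionary) (d22Lengths dictionary) fuel' pos := by
  intro fuel
  induction fuel with
  | zero =>
    intro fuel' pos h h'
    cases fuel' with
    | zero => rfl
    | succ m =>
      rw [d22AltLoop, d22AltLoop, if_neg]
      omega
  | succ m ih =>
    intro fuel' pos h h'
    cases fuel' with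
    | zero =>
      rw [d22AltLoop, d22AltLoop, if_neg]
      omega
    | succ m' =>
      rw [d22AltLoop, d22AltLoop]
      by_cases hpos : pos < string.length
      · rw [if_pos hpos, if_pos hpos]
        cases hf : d22FindLen string string.length (d22Words dictionary) pos (d22Lengths dictionary) with
        | none => rfl
        | some L =>
          have hL1 : 1 ≤ L :=
            pvLengths_pos dictionary L (pvFindLen_mem string string.length
              (d22Words dictionary) pos (d22Lengths dictionary) L hf)
          simp only []
          rw [ih m' (pos + L) (by omega) (by omega)]
      · rw [if_neg hpos, if_neg hpos]

-- MAIN: A's loop from a state with no match ending strictly before p1 equals B's loop from p0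
theorem pvMain (dictionary : List String) (string : String) :
    ∀ (p1 p0 : Nat) (res : List String), p0 < p1 → p1 ≤ string.length + 1 →
      (∀ L, 1 ≤ L → p0 + L < p1 → ¬ pvP dictionary string p0 L) →
      d22Loop dictionary string res p0 p1 =
        res ++ d22AltLoop string string.length (d22Words dictionary) (d22Lengths dictionary)
          (string.length - p0) p0 := by
  intro p1
  induction hn : string.length + 1 - p1 using Nat.strong_induction_on generalizing p1 with
  | _ k ih =>
    intro p0 res hp01 hp1 hinv
    by_cases hlt : p1 < string.length + 1
    · rw [d22Loop, if_pos hlt]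
      have hsubeq : PySem.Str.slice string (some (p0 : Int)) (some (p1 : Int)) =
          pvSub string p0 (p1 - p0) := by
        have : p0 + (p1 - p0) = p1 := by omega
        rw [pvSub, this]
      by_cases hcont : dictionary.contains
          (PySem.Str.slice string (some (p0 : Int)) (some (p1 : Int)))
      · rw [if_pos hcont]
        have hPm : pvP dictionary string p0 (p1 - p0) := by
          refine ⟨by omega, by omega, ?_⟩
          rw [hsubeq] at hcont
          simpa using hcont
        have hfind : d22FindLen string string.length (d22Words dictionary) p0
            (d22Lengths dictionary) = some (p1 - p0) :=
          pvFindLen_some dictionary string p0 (p1 - p0) _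
            (pvLengths_sorted dictionary) (pvP_mem_lengths dictionary string p0 _ hPm) hPm
            (fun L' hL' hP' => hinv L' hP'.1 (by omega) hP')
        have hrec := ih (string.length + 1 - (p1 + 1)) (by omega) (p1 + 1) rfl p1
          (res ++ [PySem.Str.slice string (some (p0 : Int)) (some (p1 : Int))])
          (by omega) (by omega) (fun L h1 h2 _ => by omega)
        rw [hrec]
        have hfuel : string.length - p0 = (string.length - p0 - 1) + 1 := by omega
        rw [hfuel, d22AltLoop, if_pos (by omega), hfind]
        simp only []
        have hpp : p0 + (p1 - p0) = p1 := by omega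
        rw [hpp]
        rw [pvAltLoop_fuel dictionary string (string.length - p0 - 1) (string.length - p1) p1
          (by omega) (by omega)]
        rw [hsubeq]
        have : pvSub string p0 (p1 - p0) =
            PySem.Str.slice string (some (p0 : Int)) (some ((p0 + (p1 - p0) : Nat) : Int)) := rfl
        rw [this, hpp]
        simp
      · rw [if_neg hcont]
        have hrec := ih (string.length + 1 - (p1 + 1)) (by omega) (p1 + 1) rfl p0 res
          (by omega) (by omega) ?_
        · exact hrec
        · intro L h1 h2 hP
          by_cases hL : p0 + L < p1
          · exact hinv L h1 hL hP
          · have : p0 + L = p1 := by omega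
            apply hcont
            have : pvSub string p0 L =
                PySem.Str.slice string (some (p0 : Int)) (some (p1 : Int)) := by
              rw [hsubeq]
              have : p1 - p0 = L := by omega
              rw [this]
            rw [← this]
            simpa using hP.2.2
    · rw [d22Loop, if_neg hlt]
      have hp1n : p1 = string.length + 1 := by omega
      have hnone : d22AltLoop string string.length (d22Words dictionary)
          (d22Lengths dictionary) (string.length - p0) p0 = [] := by
        rcases Nat.eq_zero_or_pos (string.length - p0) with hz | hpos
        · rw [hz, d22AltLoop]
        · have hfnone : d22FindLen string string.length (d22Words dictionary) p0
              (d22Lengths dictionary) = none := by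
            apply pvFindLen_none
            intro L hL hP
            have h2 := hP.2.1
            exact hinv L hP.1 (by omega) hP
          have hsplit : string.length - p0 = (string.length - p0 - 1) + 1 := by omega
          rw [hsplit, d22AltLoop, if_pos (by omega), hfnone]
      rw [hnone, List.append_nil]

-- ===== VERDICT (by name: the statement is the Claim_ definition above) =====
theorem d22_spec : Claim_equal_d22 := by
  intro dictionary string _
  unfold Spec_d22 d22 d22_alt
  have := pvMain dictionary string 1 0 [] (by omega) (by omega) (fun L h1 h2 => by omega)
  rw [this]
  simp
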